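-- pv_equiv track=rewrite | github.com/Spinney20/rag | backend/app/core/prompts.py | _find_relevant_equivalences
-- ===== SOURCE A (Python) =====
-- EQUIVALENCES = {
--     "OB37": ["BST500S", "S500"],
--     "PC52": ["BST500S"],
--     "B200": ["C16/20"], "B250": ["C16/20"], "B300": ["C20/25"],
--     "B350": ["C25/30"], "B400": ["C30/37"], "B500": ["C35/45"],
--     "OL37": ["S235JR", "S235"], "OL44": ["S275JR", "S275"], "OL52": ["S355JR", "S355"],
-- }
--
-- def _find_relevant_equivalences(standards: list[str] | None) -> dict[str, list[str]]:
--     """Find material equivalences relevant to the given standards."""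
--     if not standards:
--         return {}
--     relevant = {}
--     standards_lower = {s.lower().replace(" ", "") for s in standards}
--     for old, news in EQUIVALENCES.items():
--         old_lower = old.lower().replace(" ", "")
--         if old_lower in standards_lower:
--             relevant[old] = news
--         for new in news:
--             if new.lower().replace(" ", "") in standards_lower:
--                 relevant[old] = news
--                 break
--     return relevant
-- ===== SOURCE B (Python) =====
-- EQUIVALENCES = {
--     "OB37": ["BST500S", "S500"],
--     "PC52": ["BST500S"],
--     "B200": ["C16/20"], "B250": ["C16/20"], "B300": ["C20/25"],
--     "B350": ["C25/30"], "B400": ["C30/37"], "B500": ["C35/45"],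
--     "OL37": ["S235JR", "S235"], "OL44": ["S275JR", "S275"], "OL52": ["S355JR", "S355"],
-- }
--
-- def _find_relevant_equivalences(standards):
--     """Find material equivalences relevant to the given standards."""
--     if not standards:
--         return {}
--     # inverted index: normalized token -> old keys owning it (handles shared tokens)
--     index = {}
--     for old, news in EQUIVALENCES.items():
--         for tok in [old, *news]:
--             index.setdefault(tok.lower().replace(" ", ""), []).append(old)
--     matched = set()
--     for s in standards:
--         matched.update(index.get(s.lower().replace(" ", ""), ()))
--     return {old: news for old, news in EQUIVALENCES.items() if old in matched}
-- ===== Notes on version B (the rewrite author's own statement) =====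
-- stated objective: alternative
-- what changed: Replaces the per-entry membership scans of A with an inverted index from each normalized token to its owning keys, then traverses the input standards once collecting the matched keys and emits them in table order.
import Mathlib
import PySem

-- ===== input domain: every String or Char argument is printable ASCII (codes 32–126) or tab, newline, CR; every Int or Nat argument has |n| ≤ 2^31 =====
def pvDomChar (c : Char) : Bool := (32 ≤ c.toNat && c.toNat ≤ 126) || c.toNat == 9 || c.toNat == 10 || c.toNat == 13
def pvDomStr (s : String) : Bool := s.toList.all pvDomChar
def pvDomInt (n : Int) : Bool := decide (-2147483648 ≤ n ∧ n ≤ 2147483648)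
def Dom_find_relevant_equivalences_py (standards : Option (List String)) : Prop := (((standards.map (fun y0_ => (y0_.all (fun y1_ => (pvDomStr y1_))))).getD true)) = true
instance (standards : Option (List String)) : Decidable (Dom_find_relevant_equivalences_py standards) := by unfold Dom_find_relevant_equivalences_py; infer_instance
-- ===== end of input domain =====

-- B replaces A's per-entry membership scans by an inverted token index queried once per input standard (objective: alternative decomposition, same result).

-- s.lower().replace(" ", "")  (shared normalization helper, used by both ports)
def pvNorm (s : String) : String := PySem.Str.replace (PySem.Str.lower s) " " ""

-- the module-level constant EQUIVALENCES, in its Python insertion order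
def pvEQUIVALENCES : List (String × List String) :=
  [("OB37", ["BST500S", "S500"]), ("PC52", ["BST500S"]),
   ("B200", ["C16/20"]), ("B250", ["C16/20"]), ("B300", ["C20/25"]),
   ("B350", ["C25/30"]), ("B400", ["C30/37"]), ("B500", ["C35/45"]),
   ("OL37", ["S235JR", "S235"]), ("OL44", ["S275JR", "S275"]), ("OL52", ["S355JR", "S355"])]

-- ===== PORT A =====
def find_relevant_equivalences_py (standards : Option (List String)) : List (String × List String) :=
  match standards with
  | none => []   -- `if not standards: return {}`
  | some l =>
    if l = [] then [] else
    let standardsLower : PySem.Set String := PySem.Set.ofList (l.map pvNorm)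
    (pvEQUIVALENCES.foldl (fun relevant p =>
        let relevant := if standardsLower.contains (pvNorm p.1) then relevant.insert p.1 p.2 else relevant
        -- `for new in news: if …: relevant[old] = news; break` — inserts once iff some new matches
        if p.2.any (fun n => standardsLower.contains (pvNorm n)) then relevant.insert p.1 p.2 else relevant)
      PySem.Dict.empty).items

-- ===== PORT B =====
-- the inverted index: normalized token -> old keys owning it (setdefault(..., []).append(old))
def pvIndex : PySem.Dict String (List String) :=
  pvEQUIVALENCES.foldl (fun index p =>
    (p.1 :: p.2).foldl (fun index tok => index.modify (pvNorm tok) [] (· ++ [p.1])) index)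
    PySem.Dict.empty

def find_relevant_equivalences_py_alt (standards : Option (List String)) : List (String × List String) :=
  match standards with
  | none => []
  | some l =>
    if l = [] then [] else
    let matched : PySem.Set String :=
      l.foldl (fun m s => PySem.Set.update m (pvIndex.getD (pvNorm s) [])) PySem.Set.empty
    pvEQUIVALENCES.filter (fun p => matched.contains p.1)

-- ===== PRECONDITION & SPEC =====
def Spec_find_relevant_equivalences_py (standards : Option (List String)) (out : List (String × List String)) : Prop := out = find_relevant_equivalences_py_alt standards
instance (standards : Option (List String)) (out : List (String × List String)) : Decidable (Spec_find_relevant_equivalences_py standards out) := by unfold Spec_find_relevant_equivalences_py; infer_instance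

-- ===== CLAIM (what is proved, stated in full; the proofs are below) =====
def Claim_equal_find_relevant_equivalences_py : Prop := ∀ (standards : Option (List String)), Dom_find_relevant_equivalences_py standards → Spec_find_relevant_equivalences_py standards (find_relevant_equivalences_py standards)

-- ===== LEMMAS AND PROOFS =====

-- A's double-conditional insert collapses to a single conditional insert
theorem pv_step_collapse {κ ν : Type} [BEq κ] [LawfulBEq κ] (d : PySem.Dict κ ν) (k : κ) (v : ν)
    (c1 c2 : Bool) :
    (if c2 then (if c1 then d.insert k v else d).insert k v else (if c1 then d.insert k v else d))
      = if c1 || c2 then d.insert k v else d := by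
  cases c1 <;> cases c2 <;> simp [PySem.Dict.insert_insert_self]

-- inserting a fresh key appends one item
theorem pv_items_insert_fresh {κ ν : Type} [BEq κ] [LawfulBEq κ] (d : PySem.Dict κ ν) (k : κ) (v : ν)
    (h : d.contains k = false) : (d.insert k v).items = d.items ++ [(k, v)] := by
  have := PySem.Dict.items_foldl_insert_fresh [(k, v)] (·.1) (·.2) d
    (by simpa using h) (by simp)
  simpa using this

-- A's fold over entries with pairwise-distinct keys produces exactly the filtered entry list
theorem pv_foldA (c1 c2 : String × List String → Bool) :
    ∀ (L : List (String × List String)) (d : PySem.Dict String (List String)),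
      (L.map (·.1)).Nodup → (∀ p ∈ L, d.contains p.1 = false) →
      (L.foldl (fun relevant p =>
          let r := if c1 p then relevant.insert p.1 p.2 else relevant
          if c2 p then r.insert p.1 p.2 else r) d).items
        = d.items ++ L.filter (fun p => c1 p || c2 p) := by
  intro L
  induction L with
  | nil => intro d _ _; simp
  | cons p rest ih =>
    intro d hnd hfresh
    have hstep : (let r := if c1 p then d.insert p.1 p.2 else d;
        if c2 p then r.insert p.1 p.2 else r) = if c1 p || c2 p then d.insert p.1 p.2 else d := by
      simpa using pv_step_collapse d p.1 p.2 (c1 p) (c2 p)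
    simp only [List.foldl_cons, hstep]
    by_cases h : (c1 p || c2 p) = true
    · have hfresh' : ∀ q ∈ rest, (d.insert p.1 p.2).contains q.1 = false := by
        intro q hq
        rw [PySem.Dict.contains_insert]
        have hne : q.1 ≠ p.1 := by
          simp only [List.map_cons, List.nodup_cons] at hnd
          intro he; exact hnd.1 (he ▸ List.mem_map_of_mem hq)
        simp [hne, hfresh q (List.mem_cons_of_mem _ hq)]
      rw [h]
      simp only [if_true]
      rw [ih _ (by simpa using hnd.of_cons) hfresh',
        pv_items_insert_fresh d p.1 p.2 (hfresh p (List.mem_cons_self ..))]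
      simp [h]
    · simp only [h, if_false, Bool.false_eq_true]
      rw [ih _ (by simpa using hnd.of_cons) (fun q hq => hfresh q (List.mem_cons_of_mem _ hq))]
      simp [h]

-- membership in B's matched set
theorem pv_mem_matched (g : String → List String) (x : String) :
    ∀ (l : List String) (m : PySem.Set String),
      x ∈ l.foldl (fun m s => PySem.Set.update m (g s)) m ↔ x ∈ m ∨ ∃ s ∈ l, x ∈ g s := by
  intro l
  induction l with
  | nil => simp
  | cons s rest ih =>
    intro m
    simp only [List.foldl_cons, ih, PySem.Set.mem_update]
    constructor
    · rintro ((h | h) | ⟨t, ht, h⟩)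
      · exact Or.inl h
      · exact Or.inr ⟨s, List.mem_cons_self .., h⟩
      · exact Or.inr ⟨t, List.mem_cons_of_mem _ ht, h⟩
    · rintro (h | ⟨t, ht, h⟩)
      · exact Or.inl (Or.inl h)
      · rcases List.mem_cons.mp ht with rfl | ht
        · exact Or.inl (Or.inr h)
        · exact Or.inr ⟨t, ht, h⟩

-- the token/owner pair list underlying the index
def pvPairs : List (String × String) :=
  pvEQUIVALENCES.flatMap (fun p => (p.1 :: p.2).map (fun tok => (pvNorm tok, p.1)))

-- an index lookup returns the owners of the queried token, in table order
theorem pv_index_getD (t : String) :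
    pvIndex.getD t [] = (pvPairs.filter (fun q => q.1 == t)).map (·.2) := by
  have h1 : pvIndex = pvPairs.foldl (fun d q => d.modify q.1 [] (· ++ [q.2])) PySem.Dict.empty := by
    unfold pvIndex pvPairs
    rw [List.foldl_flatMap]
    simp [List.foldl_map]
  rw [h1, PySem.Dict.getD_foldl_modify_append]
  simp [PySem.Dict.getD, PySem.Dict.empty, PySem.Dict.get?]

-- pvEQUIVALENCES has injective keys
set_option maxHeartbeats 2000000 in
theorem pv_keyInj : ∀ p ∈ pvEQUIVALENCES, ∀ p' ∈ pvEQUIVALENCES, p.1 = p'.1 → p = p' := by decide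

set_option maxHeartbeats 2000000 in
theorem pv_keys_nodup : (pvEQUIVALENCES.map (·.1)).Nodup := by decide

-- for an entry p of the table, A's per-entry condition coincides with membership in B's matched set
theorem pv_cond_iff (l : List String) (p : String × List String) (hp : p ∈ pvEQUIVALENCES) :
    ((PySem.Set.ofList (l.map pvNorm)).contains (pvNorm p.1)
      || p.2.any (fun n => (PySem.Set.ofList (l.map pvNorm)).contains (pvNorm n))) = true
    ↔ p.1 ∈ l.foldl (fun m s => PySem.Set.update m (pvIndex.getD (pvNorm s) [])) PySem.Set.empty := by
  rw [pv_mem_matched]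
  simp only [PySem.Set.mem_ofList, Bool.or_eq_true, PySem.Set.contains_iff, List.any_eq_true,
    List.mem_map, PySem.Set.mem_ofList]
  constructor
  · intro h
    have h2 : ∃ tok ∈ p.1 :: p.2, ∃ s ∈ l, pvNorm tok = pvNorm s := by
      rcases h with ⟨s, hs, he⟩ | ⟨n, hn, a, ha, he⟩
      · exact ⟨p.1, List.mem_cons_self, s, hs, he.symm⟩
      · exact ⟨n, List.mem_cons_of_mem _ hn, a, ha, he.symm⟩
    rcases h2 with ⟨tok, htok, s, hs, he⟩
    refine Or.inr ⟨s, hs, ?_⟩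
    rw [pv_index_getD]
    simp only [List.mem_map, List.mem_filter, beq_iff_eq]
    refine ⟨(pvNorm tok, p.1), ⟨?_, he⟩, rfl⟩
    unfold pvPairs
    simp only [List.mem_flatMap, List.mem_map]
    exact ⟨p, hp, tok, htok, rfl⟩
  · rintro (h | ⟨s, hs, hm⟩)
    · simp [PySem.Set.empty] at h
    · rw [pv_index_getD] at hm
      simp only [List.mem_map, List.mem_filter, beq_iff_eq] at hm
      rcases hm with ⟨q, ⟨hq, hqt⟩, hq2⟩
      unfold pvPairs at hq
      simp only [List.mem_flatMap, List.mem_map] at hq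
      rcases hq with ⟨p', hp', tok, htok, rfl⟩
      have hpp : p' = p := pv_keyInj p' hp' p hp hq2
      subst hpp
      dsimp only at hqt
      rcases List.mem_cons.mp htok with rfl | htok
      · exact Or.inl ⟨s, hs, hqt.symm⟩
      · exact Or.inr ⟨tok, htok, s, hs, hqt.symm⟩

-- ===== VERDICT (by name: the statement is the Claim_ definition above) =====
theorem find_relevant_equivalences_py_spec : Claim_equal_find_relevant_equivalences_py := by
  intro standards _
  unfold Spec_find_relevant_equivalences_py find_relevant_equivalences_py find_relevant_equivalences_py_alt
  match standards with
  | none => rfl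
  | some l =>
    by_cases hl : l = []
    · simp [hl]
    · simp only [hl, if_false]
      rw [pv_foldA _ _ pvEQUIVALENCES PySem.Dict.empty pv_keys_nodup (by intro p _; rfl)]
      have hemp : (PySem.Dict.empty : PySem.Dict String (List String)).items = [] := rfl
      rw [hemp, List.nil_append]
      apply List.filter_congr
      intro p hp
      exact Bool.eq_iff_iff.mpr ((pv_cond_iff l p hp).trans (PySem.Set.contains_iff _ _).symm)
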